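-- pv_equiv track=rewrite | github.com/gepa71/whuts-solver | whuts_verify.py | is_same_block
-- ===== SOURCE A (Python) =====
-- def rotate_x(block):
--     return tuple([(x, -z, y) for x, y, z in block])
--
-- def rotate_y(block):
--     return tuple([(z, y, -x) for x, y, z in block])
--
-- def rotate_z(block):
--     return tuple([(-y, x, z) for x, y, z in block])
--
-- def norm0(block):
--     minx = block[0][0]
--     miny = block[0][1]
--     minz = block[0][2]
--     for x, y, z in block:
--         minx = min(minx, x)
--         miny = min(miny, y)
--         minz = min(minz, z)
--     return tuple([(x-minx, y-miny, z-minz) for x, y, z in block])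
--
-- def is_same_block(block1, block2):
--     block1n = norm0(block1)
--     block2n = norm0(block2)
--     for i in range(3):
--         for j in range(4):
--             block2n = norm0(rotate_y(block2n))
--             if set(block1n) == set(block2n):
--                 return True
--         block2n = norm0(rotate_x(block2n))
--         for j in range(4):
--             block2n = norm0(rotate_y(block2n))
--             if set(block1n) == set(block2n):
--                 return True
--         block2n = norm0(rotate_z(block2n))
--     return False
-- ===== SOURCE B (Python) =====
-- # B: canonical orbit-fingerprint comparison.  Each block's fingerprint is the set of
-- # canonical keys of its 24 proper rotations (rotations given as 3x3 matrices); a key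
-- # packs each normalized cell into one integer (mixed radix, base _K) and sorts them.
-- # Two blocks match under rotation iff their rotation orbits coincide, i.e. iff the
-- # fingerprints are equal as sets.
--
-- _K = 1 << 33  # exceeds any normalized coordinate for |coord| <= 2**31
--
-- _MATS = [
--     ((0, 0, 1), (0, 1, 0), (-1, 0, 0)),
--     ((-1, 0, 0), (0, 1, 0), (0, 0, -1)),
--     ((0, 0, -1), (0, 1, 0), (1, 0, 0)),
--     ((1, 0, 0), (0, 1, 0), (0, 0, 1)),
--     ((0, 1, 0), (0, 0, -1), (-1, 0, 0)),
--     ((-1, 0, 0), (0, 0, -1), (0, -1, 0)),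
--     ((0, -1, 0), (0, 0, -1), (1, 0, 0)),
--     ((1, 0, 0), (0, 0, -1), (0, 1, 0)),
--     ((0, 1, 0), (1, 0, 0), (0, 0, -1)),
--     ((0, 0, -1), (1, 0, 0), (0, -1, 0)),
--     ((0, -1, 0), (1, 0, 0), (0, 0, 1)),
--     ((0, 0, 1), (1, 0, 0), (0, 1, 0)),
--     ((1, 0, 0), (0, -1, 0), (0, 0, -1)),
--     ((0, 0, -1), (0, -1, 0), (-1, 0, 0)),
--     ((-1, 0, 0), (0, -1, 0), (0, 0, 1)),
--     ((0, 0, 1), (0, -1, 0), (1, 0, 0)),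
--     ((1, 0, 0), (0, 0, 1), (0, -1, 0)),
--     ((0, -1, 0), (0, 0, 1), (-1, 0, 0)),
--     ((-1, 0, 0), (0, 0, 1), (0, 1, 0)),
--     ((0, 1, 0), (0, 0, 1), (1, 0, 0)),
--     ((0, 0, 1), (-1, 0, 0), (0, -1, 0)),
--     ((0, -1, 0), (-1, 0, 0), (0, 0, -1)),
--     ((0, 0, -1), (-1, 0, 0), (0, 1, 0)),
--     ((0, 1, 0), (-1, 0, 0), (0, 0, 1)),
-- ]
--
--
-- def _apply(m, p):
--     return tuple(r[0] * p[0] + r[1] * p[1] + r[2] * p[2] for r in m)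
--
--
-- def _key(pts):
--     mx = min(p[0] for p in pts)
--     my = min(p[1] for p in pts)
--     mz = min(p[2] for p in pts)
--     return tuple(sorted({(x - mx) * _K * _K + (y - my) * _K + (z - mz)
--                          for x, y, z in pts}))
--
--
-- def _fingerprint(block):
--     return {_key([_apply(m, p) for p in block]) for m in _MATS}
--
--
-- def is_same_block(block1, block2):
--     return _fingerprint(block1) == _fingerprint(block2)
-- ===== Notes on version B (the rewrite author's own statement) =====
-- stated objective: alternative
-- what changed: A threads one rotated copy of block2 through an interleaved 3x(4+4) rotate/normalize/compare loop with early return; B computes for each block a canonical orbit fingerprint - the set of sorted integer-packed (mixed-radix) keys of its 24 matrix rotations - and just compares the two fingerprints, which is correct because two orbits of the rotation group either coincide or are disjoint.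
import Mathlib
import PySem

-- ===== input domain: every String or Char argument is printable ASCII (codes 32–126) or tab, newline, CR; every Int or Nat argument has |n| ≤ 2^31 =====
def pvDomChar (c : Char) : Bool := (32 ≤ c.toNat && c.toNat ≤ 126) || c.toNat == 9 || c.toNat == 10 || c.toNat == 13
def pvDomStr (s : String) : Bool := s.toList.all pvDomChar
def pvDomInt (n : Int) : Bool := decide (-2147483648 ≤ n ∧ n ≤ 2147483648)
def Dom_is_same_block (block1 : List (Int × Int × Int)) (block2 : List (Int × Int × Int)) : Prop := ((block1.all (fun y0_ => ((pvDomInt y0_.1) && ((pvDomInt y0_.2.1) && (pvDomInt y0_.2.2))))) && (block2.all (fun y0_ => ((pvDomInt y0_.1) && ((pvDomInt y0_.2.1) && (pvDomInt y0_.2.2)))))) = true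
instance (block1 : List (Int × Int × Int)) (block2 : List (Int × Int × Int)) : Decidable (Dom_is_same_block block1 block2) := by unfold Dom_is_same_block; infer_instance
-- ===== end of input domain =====

-- B compares canonical orbit fingerprints (sets of sorted integer-packed keys of all 24
-- matrix rotations of each block) instead of A's interleaved rotate-and-check loop (objective: alternative).

-- ===== PORT A =====
def rotate_x (block : List (Int × Int × Int)) : List (Int × Int × Int) :=
  block.map (fun p => (p.1, -p.2.2, p.2.1))

def rotate_y (block : List (Int × Int × Int)) : List (Int × Int × Int) :=
  block.map (fun p => (p.2.2, p.2.1, -p.1))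

def rotate_z (block : List (Int × Int × Int)) : List (Int × Int × Int) :=
  block.map (fun p => (-p.2.1, p.1, p.2.2))

def norm0 (block : List (Int × Int × Int)) : List (Int × Int × Int) :=
  match block with
  | [] => []    -- Python raises IndexError on block[0]; empty blocks are excluded by Pre_
  | p0 :: _ =>
    let m := block.foldl (fun m p => (min m.1 p.1, min m.2.1 p.2.1, min m.2.2 p.2.2)) p0
    block.map (fun p => (p.1 - m.1, p.2.1 - m.2.1, p.2.2 - m.2.2))

-- the inner 'for j in range(4)' loop with its early return (flag), threading block2n
def spinY (block1n : List (Int × Int × Int)) : Nat → List (Int × Int × Int) → Bool × List (Int × Int × Int)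
  | 0, b2n => (false, b2n)
  | n+1, b2n =>
    let b2n' := norm0 (rotate_y b2n)
    if PySem.Set.equal (PySem.Set.ofList block1n) (PySem.Set.ofList b2n') then (true, b2n')
    else spinY block1n n b2n'

-- the outer 'for i in range(3)' loop
def outerA (block1n : List (Int × Int × Int)) : Nat → List (Int × Int × Int) → Bool
  | 0, _ => false
  | n+1, b2n =>
    let r1 := spinY block1n 4 b2n
    if r1.1 then true
    else
      let r2 := spinY block1n 4 (norm0 (rotate_x r1.2))
      if r2.1 then true
      else outerA block1n n (norm0 (rotate_z r2.2))

def is_same_block (block1 : List (Int × Int × Int)) (block2 : List (Int × Int × Int)) : Bool :=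
  outerA (norm0 block1) 3 (norm0 block2)

-- ===== PORT B =====
-- Source B's _MATS: the 24 proper rotations as 3x3 integer matrices (rows)
def matsB : List ((Int × Int × Int) × (Int × Int × Int) × (Int × Int × Int)) :=
  [ ((0, 0, 1), (0, 1, 0), (-1, 0, 0)),
    ((-1, 0, 0), (0, 1, 0), (0, 0, -1)),
    ((0, 0, -1), (0, 1, 0), (1, 0, 0)),
    ((1, 0, 0), (0, 1, 0), (0, 0, 1)),
    ((0, 1, 0), (0, 0, -1), (-1, 0, 0)),
    ((-1, 0, 0), (0, 0, -1), (0, -1, 0)),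
    ((0, -1, 0), (0, 0, -1), (1, 0, 0)),
    ((1, 0, 0), (0, 0, -1), (0, 1, 0)),
    ((0, 1, 0), (1, 0, 0), (0, 0, -1)),
    ((0, 0, -1), (1, 0, 0), (0, -1, 0)),
    ((0, -1, 0), (1, 0, 0), (0, 0, 1)),
    ((0, 0, 1), (1, 0, 0), (0, 1, 0)),
    ((1, 0, 0), (0, -1, 0), (0, 0, -1)),
    ((0, 0, -1), (0, -1, 0), (-1, 0, 0)),
    ((-1, 0, 0), (0, -1, 0), (0, 0, 1)),
    ((0, 0, 1), (0, -1, 0), (1, 0, 0)),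
    ((1, 0, 0), (0, 0, 1), (0, -1, 0)),
    ((0, -1, 0), (0, 0, 1), (-1, 0, 0)),
    ((-1, 0, 0), (0, 0, 1), (0, 1, 0)),
    ((0, 1, 0), (0, 0, 1), (1, 0, 0)),
    ((0, 0, 1), (-1, 0, 0), (0, -1, 0)),
    ((0, -1, 0), (-1, 0, 0), (0, 0, -1)),
    ((0, 0, -1), (-1, 0, 0), (0, 1, 0)),
    ((0, 1, 0), (-1, 0, 0), (0, 0, 1)) ]

-- Source B's _apply: matrix · point (row dot products)
def applyM (m : (Int × Int × Int) × (Int × Int × Int) × (Int × Int × Int)) (p : Int × Int × Int) : Int × Int × Int :=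
  (m.1.1 * p.1 + m.1.2.1 * p.2.1 + m.1.2.2 * p.2.2,
   m.2.1.1 * p.1 + m.2.1.2.1 * p.2.1 + m.2.1.2.2 * p.2.2,
   m.2.2.1 * p.1 + m.2.2.2.1 * p.2.1 + m.2.2.2.2 * p.2.2)

-- Source B's _K = 1 << 33
def encK : Int := 8589934592

-- Source B's _key: normalize, pack each cell into one integer, sorted set of them
-- (min() raises ValueError on an empty block; those inputs are excluded by Pre_)
def keyB (pts : List (Int × Int × Int)) : List Int :=
  match PySem.List.min? (pts.map (·.1)) (fun v => v),
        PySem.List.min? (pts.map (·.2.1)) (fun v => v),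
        PySem.List.min? (pts.map (·.2.2)) (fun v => v) with
  | some mx, some my, some mz =>
      PySem.List.sorted
        (PySem.Set.ofList (pts.map (fun p => (p.1 - mx) * encK * encK + (p.2.1 - my) * encK + (p.2.2 - mz))))
        (fun v => v) false
  | _, _, _ => []

-- Source B's _fingerprint: the set of the 24 orientation keys
def fingerprintB (block : List (Int × Int × Int)) : PySem.Set (List Int) :=
  PySem.Set.ofList (matsB.map (fun m => keyB (block.map (applyM m))))

def is_same_block_alt (block1 : List (Int × Int × Int)) (block2 : List (Int × Int × Int)) : Bool :=
  PySem.Set.equal (fingerprintB block1) (fingerprintB block2)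

-- ===== PRECONDITION & SPEC =====
-- Pre_ excludes empty blocks, on which A raises IndexError in norm0 (block[0]).
def Pre_is_same_block (block1 : List (Int × Int × Int)) (block2 : List (Int × Int × Int)) : Prop :=
  block1 ≠ [] ∧ block2 ≠ []
instance (block1 : List (Int × Int × Int)) (block2 : List (Int × Int × Int)) : Decidable (Pre_is_same_block block1 block2) := by unfold Pre_is_same_block; infer_instance

def pvWitness_is_same_block : (List (Int × Int × Int)) × (List (Int × Int × Int)) :=
  ([(0, 0, 0)], [(1, 2, 3)])

def Spec_is_same_block (block1 : List (Int × Int × Int)) (block2 : List (Int × Int × Int)) (out : Bool) : Prop := out = is_same_block_alt block1 block2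
instance (block1 : List (Int × Int × Int)) (block2 : List (Int × Int × Int)) (out : Bool) : Decidable (Spec_is_same_block block1 block2 out) := by unfold Spec_is_same_block; infer_instance

-- ===== CLAIM (what is proved, stated in full; the proofs are below) =====
def Claim_equal_is_same_block : Prop := ∀ (block1 : List (Int × Int × Int)) (block2 : List (Int × Int × Int)), Dom_is_same_block block1 block2 → Pre_is_same_block block1 block2 → Spec_is_same_block block1 block2 (is_same_block block1 block2)

-- ===== LEMMAS AND PROOFS =====

-- A's componentwise running-min fold splits into three scalar min folds
theorem foldl_min_triple (t : List (Int × Int × Int)) (h : Int × Int × Int) :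
    t.foldl (fun m p => (min m.1 p.1, min m.2.1 p.2.1, min m.2.2 p.2.2)) h
      = ((t.map (·.1)).foldl min h.1, (t.map (·.2.1)).foldl min h.2.1, (t.map (·.2.2)).foldl min h.2.2) := by
  induction t generalizing h with
  | nil => rfl
  | cons a t ih => simp [List.foldl, ih]

theorem foldl_min_map_add (l : List Int) (a : Int) (h : Int) :
    (l.map (· + a)).foldl min (h + a) = l.foldl min h + a := by
  induction l generalizing h with
  | nil => rfl
  | cons x l ih =>
    simp only [List.map_cons, List.foldl_cons]
    rw [show min (h + a) (x + a) = min h x + a by omega, ih]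

@[simp] theorem norm0_eq_nil_iff (b : List (Int × Int × Int)) : norm0 b = [] ↔ b = [] := by
  cases b <;> simp [norm0]

@[simp] theorem rotate_x_eq_nil_iff (b : List (Int × Int × Int)) : rotate_x b = [] ↔ b = [] := by
  simp [rotate_x]

@[simp] theorem rotate_y_eq_nil_iff (b : List (Int × Int × Int)) : rotate_y b = [] ↔ b = [] := by
  simp [rotate_y]

@[simp] theorem rotate_z_eq_nil_iff (b : List (Int × Int × Int)) : rotate_z b = [] ↔ b = [] := by
  simp [rotate_z]

-- norm0 is invariant under a common translation of all points
theorem foldl_min_map_sub (l : List Int) (c : Int) (h : Int) :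
    (l.map (fun x => x - c)).foldl min (h - c) = l.foldl min h - c := by
  have h2 := foldl_min_map_add l (-c) h
  simpa [sub_eq_add_neg] using h2

theorem norm0_shift (b : List (Int × Int × Int)) (v : Int × Int × Int) :
    norm0 (b.map (fun p => p - v)) = norm0 b := by
  cases b with
  | nil => rfl
  | cons p0 t =>
    simp only [List.map_cons, norm0, foldl_min_triple, List.map_map, Function.comp_def,
               Prod.fst_sub, Prod.snd_sub]
    have e1 : ((p0.1 - v.1) :: t.map (fun p : Int × Int × Int => p.1 - v.1))
        = ((p0.1 :: t.map (fun p : Int × Int × Int => p.1)).map fun x => x - v.1) := by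
      simp [List.map_map]
    have e2 : ((p0.2.1 - v.2.1) :: t.map (fun p : Int × Int × Int => p.2.1 - v.2.1))
        = ((p0.2.1 :: t.map (fun p : Int × Int × Int => p.2.1)).map fun x => x - v.2.1) := by
      simp [List.map_map]
    have e3 : ((p0.2.2 - v.2.2) :: t.map (fun p : Int × Int × Int => p.2.2 - v.2.2))
        = ((p0.2.2 :: t.map (fun p : Int × Int × Int => p.2.2)).map fun x => x - v.2.2) := by
      simp [List.map_map]
    rw [e1, e2, e3, foldl_min_map_sub, foldl_min_map_sub, foldl_min_map_sub]
    congr 1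
    · simp
    · apply List.map_congr_left
      intro p _
      simp

-- rotations commute with norm0 up to translation, so the interleaved re-normalizations collapse
theorem absorb (f : (Int × Int × Int) → (Int × Int × Int))
    (hf : ∀ p q : Int × Int × Int, f (p - q) = f p - f q)
    (X : List (Int × Int × Int)) (h : X ≠ []) :
    norm0 ((norm0 X).map f) = norm0 (X.map f) := by
  obtain ⟨p0, t, rfl⟩ := List.exists_cons_of_ne_nil h
  have h1 : norm0 (p0 :: t)
      = (p0 :: t).map (fun p => p - ((p0 :: t).foldl (fun m p => (min m.1 p.1, min m.2.1 p.2.1, min m.2.2 p.2.2)) p0)) := rfl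
  rw [h1, List.map_map]
  have h2 : (f ∘ fun p => p - ((p0 :: t).foldl (fun m p => (min m.1 p.1, min m.2.1 p.2.1, min m.2.2 p.2.2)) p0))
      = (fun q => q - f ((p0 :: t).foldl (fun m p => (min m.1 p.1, min m.2.1 p.2.1, min m.2.2 p.2.2)) p0)) ∘ f := by
    funext p; simp [Function.comp, hf]
  rw [h2, ← List.map_map, norm0_shift]

theorem absorbY (X : List (Int × Int × Int)) (h : X ≠ []) :
    norm0 (rotate_y (norm0 X)) = norm0 (rotate_y X) := by
  simp only [rotate_y]
  exact absorb _ (by intro p q; simp [Prod.ext_iff]; omega) X h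

theorem absorbX (X : List (Int × Int × Int)) (h : X ≠ []) :
    norm0 (rotate_x (norm0 X)) = norm0 (rotate_x X) := by
  simp only [rotate_x]
  exact absorb _ (by intro p q; simp [Prod.ext_iff]; omega) X h

theorem absorbZ (X : List (Int × Int × Int)) (h : X ≠ []) :
    norm0 (rotate_z (norm0 X)) = norm0 (rotate_z X) := by
  simp only [rotate_z]
  exact absorb _ (by intro p q; simp [Prod.ext_iff]; omega) X h

-- the trajectory of block2n states A visits, and the flag characterizations of the loops
def iterY : Nat → List (Int × Int × Int) → List (Int × Int × Int)
  | 0, b => b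
  | n+1, b => iterY n (norm0 (rotate_y b))

def trajY : Nat → List (Int × Int × Int) → List (List (Int × Int × Int))
  | 0, _ => []
  | n+1, b => norm0 (rotate_y b) :: trajY n (norm0 (rotate_y b))

def trajO : Nat → List (Int × Int × Int) → List (List (Int × Int × Int))
  | 0, _ => []
  | n+1, b =>
      trajY 4 b ++ trajY 4 (norm0 (rotate_x (iterY 4 b)))
        ++ trajO n (norm0 (rotate_z (iterY 4 (norm0 (rotate_x (iterY 4 b))))))

theorem spinY_fst (b1n : List (Int × Int × Int)) (n : Nat) (b2n : List (Int × Int × Int)) :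
    (spinY b1n n b2n).1
      = (trajY n b2n).any (fun s => PySem.Set.equal (PySem.Set.ofList b1n) (PySem.Set.ofList s)) := by
  induction n generalizing b2n with
  | zero => rfl
  | succ n ih =>
    simp only [spinY, trajY, List.any_cons]
    by_cases h : PySem.Set.equal (PySem.Set.ofList b1n) (PySem.Set.ofList (norm0 (rotate_y b2n))) = true
    · simp [h]
    · simp only [Bool.not_eq_true] at h
      simp [h, ih]

theorem spinY_snd (b1n : List (Int × Int × Int)) (n : Nat) (b2n : List (Int × Int × Int))
    (h : (spinY b1n n b2n).1 = false) : (spinY b1n n b2n).2 = iterY n b2n := by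
  induction n generalizing b2n with
  | zero => rfl
  | succ n ih =>
    simp only [spinY] at h ⊢
    by_cases hc : PySem.Set.equal (PySem.Set.ofList b1n) (PySem.Set.ofList (norm0 (rotate_y b2n))) = true
    · simp [hc] at h
    · simp only [Bool.not_eq_true] at hc
      simp only [hc] at h ⊢
      simp [iterY, ih _ h]

theorem outerA_eq (b1n : List (Int × Int × Int)) (n : Nat) (b2n : List (Int × Int × Int)) :
    outerA b1n n b2n
      = (trajO n b2n).any (fun s => PySem.Set.equal (PySem.Set.ofList b1n) (PySem.Set.ofList s)) := by
  induction n generalizing b2n with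
  | zero => rfl
  | succ n ih =>
    simp only [outerA, trajO, List.any_append]
    cases h1 : (spinY b1n 4 b2n).1 with
    | true => simp [← spinY_fst, h1]
    | false =>
      rw [spinY_snd b1n 4 b2n h1]
      cases h2 : (spinY b1n 4 (norm0 (rotate_x (iterY 4 b2n)))).1 with
      | true => simp [h1, ← spinY_fst, h2]
      | false =>
        rw [spinY_snd _ 4 _ h2]
        simp [h1, h2, ← spinY_fst, ih]

-- the 24 states A checks are exactly the 24 matrix rotations of block2, normalized
theorem trajO_eq_mats (b2 : List (Int × Int × Int)) (hb : b2 ≠ []) :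
    trajO 3 (norm0 b2) = matsB.map (fun m => norm0 (b2.map (applyM m))) := by
  simp only [trajO, trajY, iterY]
  simp only [absorbY, absorbX, absorbZ, hb, ne_eq, rotate_x_eq_nil_iff,
             rotate_y_eq_nil_iff, rotate_z_eq_nil_iff, not_false_eq_true]
  simp only [rotate_x, rotate_y, rotate_z, List.map_map, Function.comp_def, neg_neg,
             matsB, List.map_cons, List.map_nil, List.cons_append, List.nil_append,
             List.cons.injEq, and_true]
  repeat' apply And.intro
  all_goals
    exact congrArg norm0 (List.map_congr_left (fun p _ => by simp [applyM]))


-- A is 'some matrix rotation of block2 has the same normalized point set as block1'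
theorem isA_iff (b1 b2 : List (Int × Int × Int)) (h2 : b2 ≠ []) :
    is_same_block b1 b2 = true
      ↔ ∃ m ∈ matsB, ∀ q, q ∈ norm0 b1 ↔ q ∈ norm0 (b2.map (applyM m)) := by
  rw [is_same_block, outerA_eq, trajO_eq_mats b2 h2, List.any_map, List.any_eq_true]
  simp only [Function.comp_def, PySem.Set.equal_iff, PySem.Set.mem_ofList]

-- norm0 of a nonempty list, written as one translation
theorem norm0_cons (p0 : Int × Int × Int) (t : List (Int × Int × Int)) :
    norm0 (p0 :: t)
      = (p0 :: t).map (fun p => p - (p0 :: t).foldl (fun m p => (min m.1 p.1, min m.2.1 p.2.1, min m.2.2 p.2.2)) p0) := rfl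

-- a running min over a nonempty Int list is determined by its membership
theorem foldmin_congr (a b : Int) (l m : List Int)
    (h : ∀ q : Int, q ∈ a :: l ↔ q ∈ b :: m) : l.foldl min a = m.foldl min b := by
  have h1 := PySem.List.min?_id_cons a l
  have h2 := PySem.List.min?_id_cons b m
  have m1 := PySem.List.min?_mem h1
  have m2 := PySem.List.min?_mem h2
  have i1 := PySem.List.min?_isMin h1
  have i2 := PySem.List.min?_isMin h2
  exact le_antisymm (i1 _ ((h _).mpr m2)) (i2 _ ((h _).mp m1))

-- the componentwise min triple is determined by membership
theorem mins_congr (x0 y0 : Int × Int × Int) (xt yt : List (Int × Int × Int))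
    (h : ∀ q, q ∈ x0 :: xt ↔ q ∈ y0 :: yt) :
    (x0 :: xt).foldl (fun m p => (min m.1 p.1, min m.2.1 p.2.1, min m.2.2 p.2.2)) x0
      = (y0 :: yt).foldl (fun m p => (min m.1 p.1, min m.2.1 p.2.1, min m.2.2 p.2.2)) y0 := by
  rw [foldl_min_triple, foldl_min_triple]
  simp only [List.map_cons, List.foldl_cons, min_self]
  have hc : ∀ (f : Int × Int × Int → Int) (q : Int),
      q ∈ f x0 :: xt.map f ↔ q ∈ f y0 :: yt.map f := by
    intro f q
    have e1 : f x0 :: xt.map f = (x0 :: xt).map f := rfl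
    have e2 : f y0 :: yt.map f = (y0 :: yt).map f := rfl
    rw [e1, e2, List.mem_map, List.mem_map]
    constructor
    · rintro ⟨p, hp, rfl⟩; exact ⟨p, (h p).mp hp, rfl⟩
    · rintro ⟨p, hp, rfl⟩; exact ⟨p, (h p).mpr hp, rfl⟩
  refine Prod.ext ?_ (Prod.ext ?_ ?_)
  · exact foldmin_congr _ _ _ _ (hc (·.1))
  · exact foldmin_congr _ _ _ _ (hc (·.2.1))
  · exact foldmin_congr _ _ _ _ (hc (·.2.2))

-- the membership of norm0 is determined by the membership of the input
theorem mem_norm0_congr (X Y : List (Int × Int × Int)) (hx : X ≠ []) (hy : Y ≠ [])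
    (h : ∀ q, q ∈ X ↔ q ∈ Y) :
    ∀ q, q ∈ norm0 X ↔ q ∈ norm0 Y := by
  obtain ⟨x0, xt, rfl⟩ := List.exists_cons_of_ne_nil hx
  obtain ⟨y0, yt, rfl⟩ := List.exists_cons_of_ne_nil hy
  have hm := mins_congr x0 y0 xt yt h
  intro q
  rw [norm0_cons, norm0_cons, List.mem_map, List.mem_map, hm]
  constructor
  · rintro ⟨p, hp, rfl⟩; exact ⟨p, (h p).mp hp, rfl⟩
  · rintro ⟨p, hp, rfl⟩; exact ⟨p, (h p).mpr hp, rfl⟩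

-- applyM is additive, so it commutes with norm0 up to translation
theorem applyM_sub (m : (Int × Int × Int) × (Int × Int × Int) × (Int × Int × Int))
    (p q : Int × Int × Int) : applyM m (p - q) = applyM m p - applyM m q := by
  simp only [applyM, Prod.ext_iff, Prod.fst_sub, Prod.snd_sub]
  refine ⟨by ring, by ring, by ring⟩

theorem absorbM (m : (Int × Int × Int) × (Int × Int × Int) × (Int × Int × Int))
    (X : List (Int × Int × Int)) (h : X ≠ []) :
    norm0 ((norm0 X).map (applyM m)) = norm0 (X.map (applyM m)) :=
  absorb _ (applyM_sub m) X h

-- 3x3 matrix product; matsB is closed under it and admits right division (a finite group)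
def mulM (a b : (Int × Int × Int) × (Int × Int × Int) × (Int × Int × Int)) :
    (Int × Int × Int) × (Int × Int × Int) × (Int × Int × Int) :=
  ((a.1.1 * b.1.1 + a.1.2.1 * b.2.1.1 + a.1.2.2 * b.2.2.1,
    a.1.1 * b.1.2.1 + a.1.2.1 * b.2.1.2.1 + a.1.2.2 * b.2.2.2.1,
    a.1.1 * b.1.2.2 + a.1.2.1 * b.2.1.2.2 + a.1.2.2 * b.2.2.2.2),
   (a.2.1.1 * b.1.1 + a.2.1.2.1 * b.2.1.1 + a.2.1.2.2 * b.2.2.1,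
    a.2.1.1 * b.1.2.1 + a.2.1.2.1 * b.2.1.2.1 + a.2.1.2.2 * b.2.2.2.1,
    a.2.1.1 * b.1.2.2 + a.2.1.2.1 * b.2.1.2.2 + a.2.1.2.2 * b.2.2.2.2),
   (a.2.2.1 * b.1.1 + a.2.2.2.1 * b.2.1.1 + a.2.2.2.2 * b.2.2.1,
    a.2.2.1 * b.1.2.1 + a.2.2.2.1 * b.2.1.2.1 + a.2.2.2.2 * b.2.2.2.1,
    a.2.2.1 * b.1.2.2 + a.2.2.2.1 * b.2.1.2.2 + a.2.2.2.2 * b.2.2.2.2))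

theorem applyM_mul (a b : (Int × Int × Int) × (Int × Int × Int) × (Int × Int × Int))
    (p : Int × Int × Int) : applyM (mulM a b) p = applyM a (applyM b p) := by
  simp only [applyM, mulM, Prod.ext_iff]
  refine ⟨by ring, by ring, by ring⟩

theorem mats_closed : ∀ a ∈ matsB, ∀ b ∈ matsB, mulM a b ∈ matsB := by decide

theorem mats_div : ∀ h ∈ matsB, ∀ r ∈ matsB, ∃ g ∈ matsB, mulM g r = h := by decide

theorem mats_id : (((1, 0, 0), (0, 1, 0), (0, 0, 1)) :
    (Int × Int × Int) × (Int × Int × Int) × (Int × Int × Int)) ∈ matsB := by decide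

theorem map_applyM_id (b : List (Int × Int × Int)) :
    b.map (applyM (((1, 0, 0), (0, 1, 0), (0, 0, 1)))) = b := by
  have h : ∀ p ∈ b, applyM (((1, 0, 0), (0, 1, 0), (0, 0, 1))) p = id p := by
    intro p _; simp [applyM]
  exact (List.map_congr_left h).trans (List.map_id b)

-- coordinate bounds (from Dom_), preserved by the 24 rotations
def BndP (p : Int × Int × Int) : Prop :=
  -2147483648 ≤ p.1 ∧ p.1 ≤ 2147483648 ∧ -2147483648 ≤ p.2.1 ∧ p.2.1 ≤ 2147483648
    ∧ -2147483648 ≤ p.2.2 ∧ p.2.2 ≤ 2147483648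

theorem dom_bnd (b1 b2 : List (Int × Int × Int)) (hd : Dom_is_same_block b1 b2) :
    (∀ p ∈ b1, BndP p) ∧ (∀ p ∈ b2, BndP p) := by
  unfold Dom_is_same_block at hd
  simp only [Bool.and_eq_true, List.all_eq_true, pvDomInt, Bool.and_eq_true,
             decide_eq_true_eq] at hd
  obtain ⟨hd1, hd2⟩ := hd
  constructor
  · intro p hp; have := hd1 p hp; exact ⟨this.1.1, this.1.2, this.2.1.1, this.2.1.2, this.2.2.1, this.2.2.2⟩
  · intro p hp; have := hd2 p hp; exact ⟨this.1.1, this.1.2, this.2.1.1, this.2.1.2, this.2.2.1, this.2.2.2⟩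

theorem applyM_bnd (m : (Int × Int × Int) × (Int × Int × Int) × (Int × Int × Int))
    (hm : m ∈ matsB) (p : Int × Int × Int) (hp : BndP p) : BndP (applyM m p) := by
  obtain ⟨a1, a2, a3, a4, a5, a6⟩ := hp
  fin_cases hm <;> (refine ⟨?_, ?_, ?_, ?_, ?_, ?_⟩ <;> (simp [applyM]; omega))

-- normalized coordinates of a bounded block lie in [0, 2^32]
def NBnd (q : Int × Int × Int) : Prop :=
  0 ≤ q.1 ∧ q.1 ≤ 4294967296 ∧ 0 ≤ q.2.1 ∧ q.2.1 ≤ 4294967296 ∧ 0 ≤ q.2.2 ∧ q.2.2 ≤ 4294967296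

theorem norm0_bnd (X : List (Int × Int × Int)) (hx : X ≠ []) (hb : ∀ p ∈ X, BndP p) :
    ∀ q ∈ norm0 X, NBnd q := by
  obtain ⟨x0, xt, rfl⟩ := List.exists_cons_of_ne_nil hx
  intro q hq
  rw [norm0_cons, List.mem_map] at hq
  obtain ⟨p, hp, rfl⟩ := hq
  rw [foldl_min_triple]
  simp only [List.map_cons, List.foldl_cons, min_self]
  have key : ∀ (f : Int × Int × Int → Int),
      (∀ p ∈ x0 :: xt, -2147483648 ≤ f p ∧ f p ≤ 2147483648) →
      (-2147483648 ≤ (xt.map f).foldl min (f x0) ∧ (xt.map f).foldl min (f x0) ≤ 2147483648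
        ∧ ∀ p ∈ x0 :: xt, (xt.map f).foldl min (f x0) ≤ f p) := by
    intro f hf
    have h1 := PySem.List.min?_id_cons (f x0) (xt.map f)
    have hmem := PySem.List.min?_mem h1
    have hmin := PySem.List.min?_isMin h1
    have e : f x0 :: xt.map f = (x0 :: xt).map f := rfl
    rw [e, List.mem_map] at hmem
    obtain ⟨pm, hpm, hpme⟩ := hmem
    refine ⟨?_, ?_, ?_⟩
    · rw [← hpme]; exact (hf pm hpm).1
    · rw [← hpme]; exact (hf pm hpm).2
    · intro p hp
      exact hmin (f p) (by rw [e, List.mem_map]; exact ⟨p, hp, rfl⟩)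
  have k1 := key (·.1) (fun p hp => ⟨(hb p hp).1, (hb p hp).2.1⟩)
  have k2 := key (·.2.1) (fun p hp => ⟨(hb p hp).2.2.1, (hb p hp).2.2.2.1⟩)
  have k3 := key (·.2.2) (fun p hp => ⟨(hb p hp).2.2.2.2.1, (hb p hp).2.2.2.2.2⟩)
  have hpb := hb p hp
  refine ⟨?_, ?_, ?_, ?_, ?_, ?_⟩ <;>
    simp only [Prod.fst_sub, Prod.snd_sub, BndP] at *
  · have := k1.2.2 p hp; omega
  · omega
  · have := k2.2.2 p hp; omega
  · omega
  · have := k3.2.2 p hp; omega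
  · omega

-- the integer packing of a normalized cell, and its injectivity on the bounded range
def encOf (q : Int × Int × Int) : Int := q.1 * encK * encK + q.2.1 * encK + q.2.2

theorem enc_inj (a b : Int × Int × Int) (ha : NBnd a) (hb : NBnd b)
    (h : encOf a = encOf b) : a = b := by
  obtain ⟨a1, a2, a3⟩ := a; obtain ⟨b1, b2, b3⟩ := b
  simp only [encOf, encK, NBnd] at *
  obtain ⟨_, _, _, _, _, _⟩ := ha; obtain ⟨_, _, _, _, _, _⟩ := hb
  refine Prod.ext ?_ (Prod.ext ?_ ?_) <;> simp <;> omega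

-- keyB is the sorted set of packed normalized cells
theorem keyB_eq_enc (x0 : Int × Int × Int) (xt : List (Int × Int × Int)) :
    keyB (x0 :: xt)
      = PySem.List.sorted (PySem.Set.ofList ((norm0 (x0 :: xt)).map encOf)) (fun v => v) false := by
  simp [keyB, norm0, PySem.List.min?_id_cons, foldl_min_triple, min_self, encOf,
        List.map_map, Function.comp_def]

-- key equality is exactly equality of the normalized point sets (on bounded blocks)
theorem key_iff (X Y : List (Int × Int × Int)) (hx : X ≠ []) (hy : Y ≠ [])
    (hbx : ∀ p ∈ X, BndP p) (hby : ∀ p ∈ Y, BndP p) :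
    keyB X = keyB Y ↔ (∀ q, q ∈ norm0 X ↔ q ∈ norm0 Y) := by
  obtain ⟨x0, xt, rfl⟩ := List.exists_cons_of_ne_nil hx
  obtain ⟨y0, yt, rfl⟩ := List.exists_cons_of_ne_nil hy
  rw [keyB_eq_enc, keyB_eq_enc, PySem.List.sorted_id_eq_sorted_id_iff_perm]
  have nbx := norm0_bnd _ hx hbx
  have nby := norm0_bnd _ hy hby
  constructor
  · intro hp q
    have hm : ∀ e : Int,
        e ∈ (norm0 (x0 :: xt)).map encOf ↔ e ∈ (norm0 (y0 :: yt)).map encOf := by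
      intro e
      rw [← PySem.Set.mem_ofList, ← PySem.Set.mem_ofList ((norm0 (y0 :: yt)).map encOf)]
      exact hp.mem_iff
    constructor
    · intro hq
      have := (hm (encOf q)).mp (List.mem_map.mpr ⟨q, hq, rfl⟩)
      obtain ⟨q', hq', he⟩ := List.mem_map.mp this
      rwa [enc_inj q' q (nby q' hq') (nbx q hq) he] at hq'
    · intro hq
      have := (hm (encOf q)).mpr (List.mem_map.mpr ⟨q, hq, rfl⟩)
      obtain ⟨q', hq', he⟩ := List.mem_map.mp this
      rwa [enc_inj q' q (nbx q' hq') (nby q hq) he] at hq'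
  · intro h
    apply (List.perm_ext_iff_of_nodup (PySem.Set.nodup_ofList _) (PySem.Set.nodup_ofList _)).mpr
    intro e
    rw [PySem.Set.mem_ofList, PySem.Set.mem_ofList, List.mem_map, List.mem_map]
    constructor
    · rintro ⟨q, hq, rfl⟩; exact ⟨q, (h q).mp hq, rfl⟩
    · rintro ⟨q, hq, rfl⟩; exact ⟨q, (h q).mpr hq, rfl⟩

-- equal normalized point sets keep equal keys under any of the 24 rotations
theorem key_rot (g : (Int × Int × Int) × (Int × Int × Int) × (Int × Int × Int))
    (hg : g ∈ matsB) (X Y : List (Int × Int × Int)) (hx : X ≠ []) (hy : Y ≠ [])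
    (hbx : ∀ p ∈ X, BndP p) (hby : ∀ p ∈ Y, BndP p)
    (h : ∀ q, q ∈ norm0 X ↔ q ∈ norm0 Y) :
    keyB (X.map (applyM g)) = keyB (Y.map (applyM g)) := by
  have hx' : X.map (applyM g) ≠ [] := by simp [hx]
  have hy' : Y.map (applyM g) ≠ [] := by simp [hy]
  apply (key_iff _ _ hx' hy'
      (by rintro p hp; obtain ⟨p', hp', rfl⟩ := List.mem_map.mp hp; exact applyM_bnd g hg p' (hbx p' hp'))
      (by rintro p hp; obtain ⟨p', hp', rfl⟩ := List.mem_map.mp hp; exact applyM_bnd g hg p' (hby p' hp'))).mpr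
  rw [← absorbM g X hx, ← absorbM g Y hy]
  apply mem_norm0_congr
  · simp [hx]
  · simp [hy]
  · intro q
    rw [List.mem_map, List.mem_map]
    constructor
    · rintro ⟨p, hp, rfl⟩; exact ⟨p, (h p).mp hp, rfl⟩
    · rintro ⟨p, hp, rfl⟩; exact ⟨p, (h p).mpr hp, rfl⟩

-- ===== VERDICT (by name: the statement is the Claim_ definition above) =====
theorem is_same_block_spec : Claim_equal_is_same_block := by
  intro b1 b2 hd hpre
  obtain ⟨h1, h2⟩ := hpre
  obtain ⟨hb1, hb2⟩ := dom_bnd b1 b2 hd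
  show is_same_block b1 b2 = is_same_block_alt b1 b2
  rw [Bool.eq_iff_iff, isA_iff b1 b2 h2]
  rw [show (is_same_block_alt b1 b2 = true)
        ↔ ∀ k, k ∈ matsB.map (fun m => keyB (b1.map (applyM m)))
            ↔ k ∈ matsB.map (fun m => keyB (b2.map (applyM m))) by
      rw [is_same_block_alt, PySem.Set.equal_iff]
      simp only [fingerprintB, PySem.Set.mem_ofList]]
  constructor
  · rintro ⟨r, hr, hset⟩ k
    simp only [List.mem_map]
    have bnd2r : ∀ p ∈ b2.map (applyM r), BndP p := by
      rintro p hp; obtain ⟨p', hp', rfl⟩ := List.mem_map.mp hp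
      exact applyM_bnd r hr p' (hb2 p' hp')
    have h2r : b2.map (applyM r) ≠ [] := by simp [h2]
    constructor
    · rintro ⟨g, hg, rfl⟩
      refine ⟨mulM g r, mats_closed g hg r hr, ?_⟩
      have e : b2.map (applyM (mulM g r)) = (b2.map (applyM r)).map (applyM g) := by
        rw [List.map_map]; exact List.map_congr_left (fun p _ => applyM_mul g r p)
      rw [e]
      exact (key_rot g hg b1 (b2.map (applyM r)) h1 h2r hb1 bnd2r hset).symm
    · rintro ⟨hm, hhm, rfl⟩
      obtain ⟨g, hg, hgr⟩ := mats_div hm hhm r hr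
      refine ⟨g, hg, ?_⟩
      have e : b2.map (applyM hm) = (b2.map (applyM r)).map (applyM g) := by
        rw [← hgr, List.map_map]; exact List.map_congr_left (fun p _ => applyM_mul g r p)
      rw [e]
      exact key_rot g hg b1 (b2.map (applyM r)) h1 h2r hb1 bnd2r hset
  · intro hk
    have hmem : keyB b1 ∈ matsB.map (fun m => keyB (b2.map (applyM m))) := by
      apply (hk (keyB b1)).mp
      apply List.mem_map.mpr
      exact ⟨_, mats_id, by rw [map_applyM_id]⟩
    obtain ⟨r, hr, hkey⟩ := List.mem_map.mp hmem
    refine ⟨r, hr, ?_⟩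
    have h2r : b2.map (applyM r) ≠ [] := by simp [h2]
    have bnd2r : ∀ p ∈ b2.map (applyM r), BndP p := by
      rintro p hp; obtain ⟨p', hp', rfl⟩ := List.mem_map.mp hp
      exact applyM_bnd r hr p' (hb2 p' hp')
    exact (key_iff b1 (b2.map (applyM r)) h1 h2r hb1 bnd2r).mp hkey.symm
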